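-- pv_equiv track=rewrite | github.com/NonsoCynthia/GEM2024_ST | mapping.py | split_triples
-- ===== SOURCE A (Python) =====
-- def split_triples(text):
--     triples, triple = [], []
--     for w in text:
--         if w not in ['[TRIPLE]', '[/TRIPLE]']:
--             triple.append(w)
--         elif w == '[/TRIPLE]':
--             triples.append(triple)
--             triple = []
--     return triples
-- ===== SOURCE B (Python) =====
-- def split_triples(text):
--     bounds = [i for i, w in enumerate(text) if w == '[/TRIPLE]']
--     triples = []
--     start = 0
--     for b in bounds:
--         triples.append([w for w in text[start:b] if w != '[TRIPLE]'])
--         start = b + 1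
--     return triples
-- ===== Notes on version B (the rewrite author's own statement) =====
-- stated objective: alternative
-- what changed: Replaces the running-accumulator flush loop with boundary-based slicing: first record the index of every '[/TRIPLE]', then slice each segment between consecutive boundaries and filter out '[TRIPLE]'.
import Mathlib
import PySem

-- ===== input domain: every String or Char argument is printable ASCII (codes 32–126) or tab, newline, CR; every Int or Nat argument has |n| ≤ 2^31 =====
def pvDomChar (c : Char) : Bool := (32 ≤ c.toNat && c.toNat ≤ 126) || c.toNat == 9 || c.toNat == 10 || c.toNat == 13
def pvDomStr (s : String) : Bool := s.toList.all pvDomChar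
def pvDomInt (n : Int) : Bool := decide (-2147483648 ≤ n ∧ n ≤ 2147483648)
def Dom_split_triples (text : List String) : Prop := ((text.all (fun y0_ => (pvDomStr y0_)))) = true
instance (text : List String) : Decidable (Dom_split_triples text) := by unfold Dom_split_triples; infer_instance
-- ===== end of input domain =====

-- B replaces A's running-accumulator flush loop by boundary-based segment slicing (alternative decomposition, same cost).

-- ===== PORT A =====
-- literal port of A: one fold over the tokens with state (triples, triple)
def split_triples (text : List String) : List (List String) :=
  (text.foldl
    (fun (st : List (List String) × List String) w =>
      if !(w == "[TRIPLE]" || w == "[/TRIPLE]") then (st.1, st.2 ++ [w])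
      else if w == "[/TRIPLE]" then (st.1 ++ [st.2], [])
      else st)
    ([], [])).1

-- ===== PORT B =====
-- literal port of Source B: record delimiter positions, then slice each segment and filter '[TRIPLE]'
def split_triples_alt (text : List String) : List (List String) :=
  let bounds := (PySem.List.enumerate text 0).filterMap
    (fun p => if p.2 == "[/TRIPLE]" then some p.1 else none)
  (bounds.foldl
    (fun (st : List (List String) × Int) b =>
      (st.1 ++ [(PySem.List.slice text (some st.2) (some b)).filter (fun w => !(w == "[TRIPLE]"))],
       b + 1))
    ([], 0)).1

-- ===== PRECONDITION & SPEC =====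
def Spec_split_triples (text : List String) (out : List (List String)) : Prop := out = split_triples_alt text
instance (text : List String) (out : List (List String)) : Decidable (Spec_split_triples text out) := by unfold Spec_split_triples; infer_instance

-- ===== CLAIM (what is proved, stated in full; the proofs are below) =====
def Claim_equal_split_triples : Prop := ∀ (text : List String), Dom_split_triples text → Spec_split_triples text (split_triples text)

-- ===== LEMMAS AND PROOFS =====

-- reference function: A's loop as structural recursion on the token list
def segF : List String → List String → List (List String)
  | [], _ => []
  | w :: ws, cur =>
    if w = "[/TRIPLE]" then cur :: segF ws []
    else if w = "[TRIPLE]" then segF ws cur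
    else segF ws (cur ++ [w])

-- positions of '[/TRIPLE]' in the list
def bnds : List String → List Nat
  | [] => []
  | w :: ws => if w = "[/TRIPLE]" then 0 :: (bnds ws).map (· + 1) else (bnds ws).map (· + 1)

-- segments between consecutive boundaries, filtered
def segs (text : List String) : Nat → List Nat → List (List String)
  | _, [] => []
  | s, b :: bs =>
    ((text.drop s).take (b - s)).filter (fun w => !(w == "[TRIPLE]")) :: segs text (b + 1) bs

theorem foldlA_eq (text : List String) (acc : List (List String)) (cur : List String) :
    (text.foldl
      (fun (st : List (List String) × List String) w =>
        if !(w == "[TRIPLE]" || w == "[/TRIPLE]") then (st.1, st.2 ++ [w])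
        else if w == "[/TRIPLE]" then (st.1 ++ [st.2], [])
        else st)
      (acc, cur)).1 = acc ++ segF text cur := by
  induction text generalizing acc cur with
  | nil => simp [segF]
  | cons w ws ih =>
    rw [List.foldl_cons]
    by_cases h1 : w = "[/TRIPLE]"
    · have hstep : (if !(w == "[TRIPLE]" || w == "[/TRIPLE]") then ((acc, cur).1, (acc, cur).2 ++ [w])
          else if w == "[/TRIPLE]" then ((acc, cur).1 ++ [(acc, cur).2], ([] : List String))
          else (acc, cur)) = (acc ++ [cur], []) := by simp [h1]
      rw [hstep, ih]
      simp [segF, h1]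
    · by_cases h2 : w = "[TRIPLE]"
      · have hstep : (if !(w == "[TRIPLE]" || w == "[/TRIPLE]") then ((acc, cur).1, (acc, cur).2 ++ [w])
            else if w == "[/TRIPLE]" then ((acc, cur).1 ++ [(acc, cur).2], ([] : List String))
            else (acc, cur)) = (acc, cur) := by simp [h2]
        rw [hstep, ih]
        simp [segF, h2]
      · have hstep : (if !(w == "[TRIPLE]" || w == "[/TRIPLE]") then ((acc, cur).1, (acc, cur).2 ++ [w])
            else if w == "[/TRIPLE]" then ((acc, cur).1 ++ [(acc, cur).2], ([] : List String))
            else (acc, cur)) = (acc, cur ++ [w]) := by simp [h1, h2]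
        rw [hstep, ih]
        simp [segF, h1, h2]

theorem filterMap_enumerate_eq (text : List String) (s : Int) :
    (PySem.List.enumerate text s).filterMap
      (fun p => if p.2 == "[/TRIPLE]" then some p.1 else none)
      = (bnds text).map (fun (k : Nat) => s + (k : Int)) := by
  induction text generalizing s with
  | nil => simp [PySem.List.enumerate_nil, bnds]
  | cons w ws ih =>
    rw [PySem.List.enumerate_cons]
    by_cases h : w = "[/TRIPLE]"
    · rw [List.filterMap_cons_some (b := s) (by simp [h]), ih (s + 1)]
      have hbn : bnds (w :: ws) = 0 :: (bnds ws).map (· + 1) := by simp [bnds, h]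
      rw [hbn, List.map_cons, List.map_map]
      congr 1
      · simp
      · refine List.map_congr_left fun k _ => ?_
        simp only [Function.comp]
        push_cast
        ring
    · rw [List.filterMap_cons_none (by simp [h]), ih (s + 1)]
      have hbn : bnds (w :: ws) = (bnds ws).map (· + 1) := by simp [bnds, h]
      rw [hbn, List.map_map]
      refine List.map_congr_left fun k _ => ?_
      simp only [Function.comp]
      push_cast
      ring

theorem foldlB_eq (text : List String) (bs : List Nat) (out : List (List String)) (s : Nat) :
    ((bs.map (fun k : Nat => (k : Int))).foldl
      (fun (st : List (List String) × Int) b =>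
        (st.1 ++ [(PySem.List.slice text (some st.2) (some b)).filter (fun w => !(w == "[TRIPLE]"))],
         b + 1))
      (out, (s : Int))).1 = out ++ segs text s bs := by
  induction bs generalizing out s with
  | nil => simp [segs]
  | cons b bs ih =>
    rw [List.map_cons, List.foldl_cons]
    have hb : ((b : Int) + 1) = (((b + 1 : Nat)) : Int) := by push_cast; ring
    rw [PySem.List.slice_natCast]
    rw [hb, ih]
    simp [segs]

theorem segs_shift (w : String) (ws : List String) (bs : List Nat) (s : Nat) :
    segs (w :: ws) (s + 1) (bs.map (· + 1)) = segs ws s bs := by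
  induction bs generalizing s with
  | nil => simp [segs]
  | cons b bs ih =>
    simp only [List.map_cons, segs]
    rw [ih]
    congr 2
    simp [List.drop_succ_cons]

theorem segF_eq_segs (text : List String) (cur : List String) :
    segF text cur = match segs text 0 (bnds text) with
      | [] => []
      | sg :: rest => (cur ++ sg) :: rest := by
  induction text generalizing cur with
  | nil => simp [segF, bnds, segs]
  | cons w ws ih =>
    by_cases h1 : w = "[/TRIPLE]"
    · have htail : segs (w :: ws) 1 ((bnds ws).map (· + 1)) = segs ws 0 (bnds ws) := by
        have := segs_shift w ws (bnds ws) 0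
        simpa using this
      simp only [segF, if_pos h1, bnds]
      rw [ih []]
      simp only [segs, Nat.sub_self, List.take_zero, List.filter_nil, htail, List.nil_append]
      cases segs ws 0 (bnds ws) <;> simp
    · -- bnds (w::ws) = (bnds ws).map (·+1); head slice starts at 0 and contains w
      have hb : bnds (w :: ws) = (bnds ws).map (· + 1) := by simp [bnds, h1]
      have hseg : segs (w :: ws) 0 (bnds (w :: ws)) =
          match bnds ws with
          | [] => []
          | b :: bs' =>
            ((w :: ws.take b).filter (fun x => !(x == "[TRIPLE]"))) :: segs ws (b + 1) bs' := by
        rw [hb]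
        cases hbs : bnds ws with
        | nil => simp [segs]
        | cons b bs' =>
          simp only [List.map_cons, segs, List.drop_zero, Nat.sub_zero, List.take_succ_cons]
          congr 1
          have := segs_shift w ws bs' (b + 1)
          simpa using this
      by_cases h2 : w = "[TRIPLE]"
      · simp only [segF, if_neg h1, if_pos h2, hseg]
        rw [ih cur]
        cases hbs : bnds ws with
        | nil => simp [segs]
        | cons b bs' =>
          have hw : (w == "[TRIPLE]") = true := by simp [h2]
          simp [segs, hw]
      · simp only [segF, if_neg h1, if_neg h2, hseg]
        rw [ih (cur ++ [w])]
        cases hbs : bnds ws with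
        | nil => simp [segs]
        | cons b bs' =>
          have hw : (w == "[TRIPLE]") = false := by simp [h2]
          simp [segs, hw]

-- ===== VERDICT (by name: the statement is the Claim_ definition above) =====
theorem split_triples_spec : Claim_equal_split_triples := by
  intro text _
  unfold Spec_split_triples split_triples split_triples_alt
  rw [foldlA_eq]
  rw [filterMap_enumerate_eq]
  have hmap : (bnds text).map (fun (k : Nat) => (0 : Int) + (k : Int)) = (bnds text).map (fun (k : Nat) => ((k : Int))) := by
    apply List.map_congr_left; intro k _; ring
  rw [hmap]
  have := foldlB_eq text (bnds text) [] 0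
  simp only [Nat.cast_zero] at this
  rw [this]
  rw [segF_eq_segs]
  cases segs text 0 (bnds text) <;> simp
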